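-- pv_equiv track=rewrite | github.com/LitaiRenGit/FullTime-coding-test | identicalSubstr.py | identicalSubstr
-- ===== SOURCE A (Python) =====
-- def identicalSubstr(s):
--     def dp(s):
--         res=0
--         for i in range(len(s)):
--             for j in range(i,-1,-1):
--                 if s[i]==s[j]:
--                     res+=1
--                 else:
--                     break
--         return res
--     return dp(s)
-- ===== SOURCE B (Python) =====
-- def identicalSubstr(s):
--     res = 0
--     run = 0
--     prev = None
--     for ch in s:
--         run = run + 1 if ch == prev else 1
--         prev = ch
--         res += run
--     return res
-- ===== Notes on version B (the rewrite author's own statement) =====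
-- stated objective: faster
-- what changed: Replaced the per-index backward scan with a single pass that tracks the current run length and adds it at each character.
import Mathlib
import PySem

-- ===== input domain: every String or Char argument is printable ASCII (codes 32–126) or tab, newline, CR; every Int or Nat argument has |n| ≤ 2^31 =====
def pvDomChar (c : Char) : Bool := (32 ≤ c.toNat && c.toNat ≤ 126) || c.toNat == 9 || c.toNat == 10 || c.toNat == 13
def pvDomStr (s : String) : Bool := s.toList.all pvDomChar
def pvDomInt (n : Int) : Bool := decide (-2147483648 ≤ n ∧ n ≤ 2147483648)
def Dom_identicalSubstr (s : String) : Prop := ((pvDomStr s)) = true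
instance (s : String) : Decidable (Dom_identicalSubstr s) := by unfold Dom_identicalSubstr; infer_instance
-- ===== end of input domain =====

-- B replaces A's per-index backward scan (O(n^2)) with one pass tracking the current
-- run length (O(n)); same return value for every string.

-- ===== PORT A =====
-- inner loop 'for j in range(i,-1,-1): if s[i]==s[j]: res+=1 else: break';
-- every index j is in [0, len(s)), so 'getD j' is exact for Python's s[j]
def pvInnerA (cs : List Char) (ci : Char) : Nat → Int → Int
  | 0, res => if cs.getD 0 ' ' == ci then res + 1 else res
  | j+1, res => if cs.getD (j+1) ' ' == ci then pvInnerA cs ci j (res + 1) else res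

def identicalSubstr (s : String) : Int :=
  let cs := s.toList
  (List.range cs.length).foldl (fun res i => pvInnerA cs (cs.getD i ' ') i res) 0

-- ===== PORT B =====
def pvLoopB : List Char → Option Char → Int → Int → Int
  | [], _, _, res => res
  | ch :: rest, prev, run, res =>
    let run' : Int := if some ch == prev then run + 1 else 1
    pvLoopB rest (some ch) run' (res + run')

def identicalSubstr_alt (s : String) : Int := pvLoopB s.toList none 0 0

-- ===== PRECONDITION & SPEC =====
def Spec_identicalSubstr (s : String) (out : Int) : Prop := out = identicalSubstr_alt s
instance (s : String) (out : Int) : Decidable (Spec_identicalSubstr s out) := by unfold Spec_identicalSubstr; infer_instance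

-- ===== CLAIM (what is proved, stated in full; the proofs are below) =====
def Claim_equal_identicalSubstr : Prop := ∀ (s : String), Dom_identicalSubstr s → Spec_identicalSubstr s (identicalSubstr s)

-- ===== LEMMAS AND PROOFS =====

-- run length ending at index i, as A's inner loop computes it
def pvF (cs : List Char) (i : Nat) : Int := pvInnerA cs (cs.getD i ' ') i 0

-- tail sum of run lengths from index i
def pvS (cs : List Char) (i : Nat) : Int := ∑ k ∈ Finset.Ico i cs.length, pvF cs k

theorem pvInnerA_acc (cs : List Char) (ci : Char) :
    ∀ (j : Nat) (res : Int), pvInnerA cs ci j res = res + pvInnerA cs ci j 0 := by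
  intro j
  induction j with
  | zero => intro res; simp only [pvInnerA]; split <;> ring
  | succ k ih =>
      intro res
      simp only [pvInnerA]
      split
      · rw [ih (res + 1), ih (0 + 1)]; ring
      · ring

theorem pvG_succ (cs : List Char) (c : Char) (j : Nat) :
    pvInnerA cs c (j+1) 0 = if cs.getD (j+1) ' ' == c then 1 + pvInnerA cs c j 0 else 0 := by
  simp only [pvInnerA]
  split
  · rw [pvInnerA_acc cs c j (0 + 1)]; ring
  · rfl

theorem pvInnerA_ne (cs : List Char) (c : Char) (i : Nat) (h : cs.getD i ' ' ≠ c) :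
    pvInnerA cs c i 0 = 0 := by
  cases i with
  | zero =>
      simp only [pvInnerA]
      rw [if_neg (by simpa [List.getD_eq_getElem?_getD] using h)]
  | succ k =>
      rw [pvG_succ]
      rw [if_neg (by simpa [List.getD_eq_getElem?_getD] using h)]

theorem pvF_zero (cs : List Char) : pvF cs 0 = 1 := by
  simp [pvF, pvInnerA]

theorem pvF_succ (cs : List Char) (i : Nat) :
    pvF cs (i+1) = if cs.getD i ' ' = cs.getD (i+1) ' ' then pvF cs i + 1 else 1 := by
  unfold pvF
  rw [pvG_succ, if_pos (beq_self_eq_true _)]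
  by_cases h : cs.getD i ' ' = cs.getD (i+1) ' '
  · rw [if_pos h]
    have : pvInnerA cs (cs.getD (i+1) ' ') i 0 = pvInnerA cs (cs.getD i ' ') i 0 := by rw [h]
    rw [this]; ring
  · rw [if_neg h, pvInnerA_ne cs _ i h]; ring

theorem pvS_step (cs : List Char) (i : Nat) (hi : i < cs.length) :
    pvS cs i = pvF cs i + pvS cs (i+1) := by
  unfold pvS
  exact Finset.sum_eq_sum_Ico_succ_bot hi _

-- B's loop, started in the state reached after processing the first i characters,
-- adds exactly the tail sum of run lengths
theorem pvLoopB_eq (cs : List Char) :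
    ∀ (suffix : List Char) (i : Nat) (res : Int),
      cs.drop i = suffix →
      pvLoopB suffix (if i = 0 then none else some (cs.getD (i-1) ' '))
        (if i = 0 then 0 else pvF cs (i-1)) res = res + pvS cs i := by
  intro suffix
  induction suffix with
  | nil =>
      intro i res hdrop
      have hlen : cs.length ≤ i := by
        by_contra h
        have := List.drop_eq_nil_iff.mp hdrop
        omega
      simp [pvLoopB, pvS, Finset.Ico_eq_empty_of_le hlen]
  | cons ch rest ih =>
      intro i res hdrop
      have hch : cs[i]? = some ch := by
        have h0 : (List.drop i cs)[0]? = some ch := by rw [hdrop]; rfl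
        simpa using h0
      have hi : i < cs.length := (List.getElem?_eq_some_iff.mp hch).1
      have hgd : cs.getD i ' ' = ch := by simp [List.getD, hch]
      have hrest : cs.drop (i+1) = rest := by
        have h1 : (cs.drop i).drop 1 = rest := by rw [hdrop]; rfl
        rwa [List.drop_drop] at h1
      subst hgd
      simp only [pvLoopB]
      have hrun : (if some (cs.getD i ' ') == (if i = 0 then none else some (cs.getD (i-1) ' ')) then
          (if i = 0 then (0:Int) else pvF cs (i-1)) + 1 else 1) = pvF cs i := by
        cases i with
        | zero =>
            rw [if_pos rfl, if_pos rfl, if_neg (by simp), pvF_zero]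
        | succ k =>
            rw [if_neg (Nat.succ_ne_zero k), if_neg (Nat.succ_ne_zero k)]
            simp only [Nat.add_sub_cancel]
            rw [pvF_succ]
            by_cases h : cs.getD k ' ' = cs.getD (k+1) ' '
            · rw [if_pos h, if_pos (by rw [h]; exact beq_self_eq_true _)]
            · rw [if_neg h, if_neg (by
                intro hb
                exact h (Option.some.inj (beq_iff_eq.mp hb)).symm)]
      rw [hrun]
      have hIH := ih (i+1) (res + pvF cs i) hrest
      rw [if_neg (Nat.succ_ne_zero i), if_neg (Nat.succ_ne_zero i)] at hIH
      simp only [Nat.add_sub_cancel] at hIH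
      rw [hIH, pvS_step cs i hi]
      ring

-- A's fold equals the full sum of run lengths
theorem pvFoldA_eq (cs : List Char) :
    ∀ (n : Nat) (a : Int),
      (List.range n).foldl (fun res i => pvInnerA cs (cs.getD i ' ') i res) a
        = a + ∑ k ∈ Finset.range n, pvF cs k := by
  intro n
  induction n with
  | zero => intro a; simp
  | succ m ih =>
      intro a
      rw [List.range_succ, List.foldl_append, ih a]
      simp only [List.foldl_cons, List.foldl_nil]
      rw [pvInnerA_acc, Finset.sum_range_succ]
      show a + ∑ k ∈ Finset.range m, pvF cs k + pvF cs m = _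
      ring

-- ===== VERDICT (by name: the statement is the Claim_ definition above) =====
theorem identicalSubstr_spec : Claim_equal_identicalSubstr := by
  intro s _
  unfold Spec_identicalSubstr identicalSubstr identicalSubstr_alt
  show (List.range s.toList.length).foldl
      (fun res i => pvInnerA s.toList (s.toList.getD i ' ') i res) 0
    = pvLoopB s.toList none 0 0
  have hB := pvLoopB_eq s.toList s.toList 0 0 (by rfl)
  rw [if_pos rfl, if_pos rfl] at hB
  rw [pvFoldA_eq, hB]
  unfold pvS
  rw [Finset.range_eq_Ico]
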